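-- pv_equiv track=rewrite | github.com/cfpaperdragon/advent-of-code-2020 | Day16/day16.py | check_valid_tickets
-- ===== SOURCE A (Python) =====
-- def is_valid(value, rule_list):
--     for pair in rule_list:
--         if value >= pair[0] and value <= pair[1]:
--             return True
--     return False
--
-- def is_valid_all_rules(value, rules_dict):
--     for key in rules_dict.keys():
--         if is_valid(value, rules_dict[key]):
--             return True
--     return False
--
-- def check_valid_tickets(rules, ticket_list, cache):
--     sum = 0
--     for t in ticket_list:
--         for value in t:
--             if value not in cache.keys():
--                 cache[value] = is_valid_all_rules(value, rules)
--             if not cache[value]: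
--                 sum += value
--     return cache, sum
-- ===== SOURCE B (Python) =====
-- def check_valid_tickets(rules, ticket_list, cache):
--     # Preprocess once: flatten all rule intervals, sort by lower bound and merge
--     # overlapping intervals, so each uncached value is tested against the (small)
--     # merged interval list instead of scanning every rule.
--     intervals = [(pair[0], pair[1]) for rule_list in rules.values() for pair in rule_list]
--     merged = []  # kept most-recently-extended first
--     for lo, hi in sorted(intervals, key=lambda p: p[0]):
--         if merged and lo <= merged[0][1]:
--             merged[0] = (merged[0][0], max(merged[0][1], hi))
--         else:
--             merged.insert(0, (lo, hi))
--     total = 0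
--     for t in ticket_list:
--         for value in t:
--             if value not in cache:
--                 cache[value] = any(lo <= value <= hi for lo, hi in merged)
--             if not cache[value]:
--                 total += value
--     return cache, total
-- ===== Notes on version B (the rewrite author's own statement) =====
-- stated objective: alternative
-- what changed: Instead of scanning every interval of every rule per uncached value, B flattens the rule intervals once, sorts them and merges overlapping ones, then tests each uncached value against the merged interval list.
-- outside the precondition, e.g. on check_valid_tickets({'a': [[5]]}, [[1]], {}): A returns ({1: False}, 1), B raises IndexError
import Mathlib
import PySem

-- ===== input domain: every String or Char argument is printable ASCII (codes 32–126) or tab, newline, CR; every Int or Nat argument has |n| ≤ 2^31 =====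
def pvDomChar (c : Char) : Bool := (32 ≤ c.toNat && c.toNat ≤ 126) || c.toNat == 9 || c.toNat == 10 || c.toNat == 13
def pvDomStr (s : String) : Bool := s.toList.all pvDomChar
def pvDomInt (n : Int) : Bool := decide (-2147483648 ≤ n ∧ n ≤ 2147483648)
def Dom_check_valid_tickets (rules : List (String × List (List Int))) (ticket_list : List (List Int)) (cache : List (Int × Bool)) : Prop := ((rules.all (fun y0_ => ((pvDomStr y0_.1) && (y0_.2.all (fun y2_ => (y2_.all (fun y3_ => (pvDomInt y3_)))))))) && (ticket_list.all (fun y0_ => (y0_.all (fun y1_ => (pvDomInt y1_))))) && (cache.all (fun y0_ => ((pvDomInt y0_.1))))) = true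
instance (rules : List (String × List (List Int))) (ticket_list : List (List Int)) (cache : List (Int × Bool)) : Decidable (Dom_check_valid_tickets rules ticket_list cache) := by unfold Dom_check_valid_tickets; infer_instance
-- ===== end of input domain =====

-- B replaces A's per-value scan over every rule interval by a one-time sort-and-merge of the
-- intervals, then tests each uncached value against the merged interval list (objective: alternative).
-- Both A and B mutate `cache` in place in Python (same insertions, in the same order); the
-- theorems below are about the returned (cache, sum) pair.

-- ===== PORT A =====
-- for pair in rule_list: if value >= pair[0] and value <= pair[1]: return True
def pvIsValid (value : Int) : List (List Int) → Bool
  | [] => false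
  | pair :: rest =>
    match pair with
    | p0 :: p1 :: _ => if p0 ≤ value ∧ value ≤ p1 then true else pvIsValid value rest
    -- a pair with fewer than 2 elements makes Python raise IndexError (or skip it via
    -- short-circuit); such inputs are excluded by Pre_check_valid_tickets
    | _ => pvIsValid value rest

-- for key in rules_dict.keys(): if is_valid(value, rules_dict[key]): return True
def pvIsValidAllGo (value : Int) (d : PySem.Dict String (List (List Int))) : List String → Bool
  | [] => false
  | k :: ks => if pvIsValid value (d.getD k []) then true else pvIsValidAllGo value d ks

def pvIsValidAll (value : Int) (d : PySem.Dict String (List (List Int))) : Bool :=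
  pvIsValidAllGo value d d.keys

def check_valid_tickets (rules : List (String × List (List Int))) (ticket_list : List (List Int)) (cache : List (Int × Bool)) : (List (Int × Bool)) × Int :=
  let rulesd : PySem.Dict String (List (List Int)) := PySem.Dict.mk rules
  let st := ticket_list.foldl (fun st t =>
      t.foldl (fun (st : PySem.Dict Int Bool × Int) value =>
        let c := if st.1.contains value then st.1 else st.1.insert value (pvIsValidAll value rulesd)
        (c, if c.getD value false then st.2 else st.2 + value)) st)
    (PySem.Dict.mk cache, 0)
  (st.1.items, st.2)

-- ===== PORT B =====
-- (pair[0], pair[1]); Python B raises IndexError on a shorter pair (excluded by Pre_)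
def pvToPair : List Int → Int × Int
  | p0 :: p1 :: _ => (p0, p1)
  | _ => (0, 0)

-- one step of the merge loop; `merged` is kept most-recently-extended first
def pvMergeStep (merged : List (Int × Int)) (p : Int × Int) : List (Int × Int) :=
  match merged with
  | (mlo, mhi) :: rest => if p.1 ≤ mhi then (mlo, max mhi p.2) :: rest else p :: (mlo, mhi) :: rest
  | [] => [p]

def pvMerged (d : PySem.Dict String (List (List Int))) : List (Int × Int) :=
  (PySem.List.sorted (d.values.flatMap (fun rl => rl.map pvToPair)) (fun q => q.1) false).foldl
    pvMergeStep []

-- any(lo <= value <= hi for lo, hi in merged)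
def pvAnyContains (value : Int) (merged : List (Int × Int)) : Bool :=
  merged.any (fun q => decide (q.1 ≤ value ∧ value ≤ q.2))

def check_valid_tickets_alt (rules : List (String × List (List Int))) (ticket_list : List (List Int)) (cache : List (Int × Bool)) : (List (Int × Bool)) × Int :=
  let merged := pvMerged (PySem.Dict.mk rules)
  let st := ticket_list.foldl (fun st t =>
      t.foldl (fun (st : PySem.Dict Int Bool × Int) value =>
        let c := if st.1.contains value then st.1 else st.1.insert value (pvAnyContains value merged)
        (c, if c.getD value false then st.2 else st.2 + value)) st)
    (PySem.Dict.mk cache, 0)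
  (st.1.items, st.2)

-- ===== PRECONDITION & SPEC =====
-- Pre_ excludes (a) rules containing an interval entry with fewer than 2 elements, on which B
-- (and usually A) raises IndexError while A occasionally returns an accidental value thanks to
-- `and`-short-circuiting, and (b) association lists with duplicate rule-name or cache keys,
-- which do not correspond to any Python dict (dict keys are unique).
def Pre_check_valid_tickets (rules : List (String × List (List Int))) (_ticket_list : List (List Int)) (cache : List (Int × Bool)) : Prop :=
  (∀ r ∈ rules, ∀ pair ∈ r.2, 2 ≤ pair.length) ∧ (rules.map Prod.fst).Nodup ∧ (cache.map Prod.fst).Nodup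
instance (rules : List (String × List (List Int))) (ticket_list : List (List Int)) (cache : List (Int × Bool)) : Decidable (Pre_check_valid_tickets rules ticket_list cache) := by unfold Pre_check_valid_tickets; infer_instance

def pvWitness_check_valid_tickets : (List (String × List (List Int))) × List (List Int) × (List (Int × Bool)) :=
  ([("row", [[1, 3], [5, 7]]), ("seat", [[10, 12]])], [[2, 4], [11]], [(9, false)])

def Spec_check_valid_tickets (rules : List (String × List (List Int))) (ticket_list : List (List Int)) (cache : List (Int × Bool)) (out : (List (Int × Bool)) × Int) : Prop := out = check_valid_tickets_alt rules ticket_list cache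
instance (rules : List (String × List (List Int))) (ticket_list : List (List Int)) (cache : List (Int × Bool)) (out : (List (Int × Bool)) × Int) : Decidable (Spec_check_valid_tickets rules ticket_list cache out) := by unfold Spec_check_valid_tickets; infer_instance

-- ===== CLAIM (what is proved, stated in full; the proofs are below) =====
def Claim_equal_check_valid_tickets : Prop := ∀ (rules : List (String × List (List Int))) (ticket_list : List (List Int)) (cache : List (Int × Bool)), Dom_check_valid_tickets rules ticket_list cache → Pre_check_valid_tickets rules ticket_list cache → Spec_check_valid_tickets rules ticket_list cache (check_valid_tickets rules ticket_list cache)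

-- ===== LEMMAS AND PROOFS =====

-- A's scan of one rule's interval list is membership in its pairs
lemma pvIsValid_eq_any (v : Int) (rl : List (List Int)) (h : ∀ p ∈ rl, 2 ≤ p.length) :
    pvIsValid v rl = pvAnyContains v (rl.map pvToPair) := by
  induction rl with
  | nil => rfl
  | cons pair rest ih =>
    have hp : 2 ≤ pair.length := h pair (by simp)
    match pair, hp with
    | p0 :: p1 :: _, _ =>
      simp only [pvIsValid, pvToPair, List.map_cons, pvAnyContains, List.any_cons]
      rw [ih (fun p hp => h p (by simp [hp]))]
      by_cases hc : p0 ≤ v ∧ v ≤ p1 <;> simp [hc, pvAnyContains]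

lemma pvIsValidAllGo_eq_any (v : Int) (d : PySem.Dict String (List (List Int))) :
    ∀ ks : List String, pvIsValidAllGo v d ks = ks.any (fun k => pvIsValid v (d.getD k [])) := by
  intro ks
  induction ks with
  | nil => rfl
  | cons k ks ih =>
    simp only [pvIsValidAllGo, List.any_cons]
    by_cases hc : pvIsValid v (d.getD k []) <;> simp [hc, ih]

-- head-of-accumulator lower bound used by the merge invariant
def pvHeadLB (acc : List (Int × Int)) (x : Int × Int) : Prop :=
  match acc with
  | [] => True
  | h :: _ => h.1 ≤ x.1

-- merging an interval into the head preserves the covered set of values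
lemma pvMerge_head (v mlo mhi p1 p2 : Int) (h1 : mlo ≤ p1) (h2 : p1 ≤ mhi) :
    decide (mlo ≤ v ∧ v ≤ max mhi p2) = (decide (mlo ≤ v ∧ v ≤ mhi) || decide (p1 ≤ v ∧ v ≤ p2)) := by
  rw [← Bool.decide_or]
  apply decide_eq_decide.mpr
  constructor
  · rintro ⟨hl, hr⟩
    by_cases h : v ≤ mhi
    · exact Or.inl ⟨hl, h⟩
    · exact Or.inr ⟨by omega, by omega⟩
  · rintro (⟨hl, hr⟩ | ⟨hl, hr⟩)
    · exact ⟨hl, le_trans hr (le_max_left _ _)⟩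
    · exact ⟨le_trans h1 hl, le_trans hr (le_max_right _ _)⟩

-- the merge fold preserves the covered set, given the input sorted by lower bound
lemma pvMerge_any (v : Int) :
    ∀ (l acc : List (Int × Int)), l.Pairwise (fun a b => a.1 ≤ b.1) →
      (∀ x ∈ l, pvHeadLB acc x) →
      pvAnyContains v (l.foldl pvMergeStep acc) = (pvAnyContains v acc || pvAnyContains v l) := by
  intro l
  induction l with
  | nil => intro acc _ _; simp [pvAnyContains]
  | cons p l ih =>
    intro acc hpw hlb
    have hpwl : l.Pairwise (fun a b => a.1 ≤ b.1) := hpw.of_cons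
    have hple : ∀ x ∈ l, p.1 ≤ x.1 := fun x hx => (List.pairwise_cons.mp hpw).1 x hx
    simp only [List.foldl_cons]
    match acc with
    | [] =>
      rw [show pvMergeStep [] p = [p] from rfl, ih [p] hpwl (fun x hx => by simpa [pvMergeStep, pvHeadLB] using hple x hx)]
      simp [pvAnyContains, Bool.or_comm]
    | (mlo, mhi) :: rest =>
      have hmlo : mlo ≤ p.1 := hlb p (by simp)
      by_cases hc : p.1 ≤ mhi
      · have hstep : pvMergeStep ((mlo, mhi) :: rest) p = (mlo, max mhi p.2) :: rest := by
          simp [pvMergeStep, hc]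
        rw [hstep, ih ((mlo, max mhi p.2) :: rest) hpwl
          (fun x hx => le_trans hmlo (hple x hx))]
        simp only [pvAnyContains, List.any_cons]
        rw [pvMerge_head v mlo mhi p.1 p.2 hmlo hc]
        cases rest.any (fun q => decide (q.1 ≤ v ∧ v ≤ q.2)) <;>
          cases h1 : decide (mlo ≤ v ∧ v ≤ mhi) <;>
          cases h2 : decide (p.1 ≤ v ∧ v ≤ p.2) <;>
          cases h3 : l.any (fun q => decide (q.1 ≤ v ∧ v ≤ q.2)) <;> simp
      · have hstep : pvMergeStep ((mlo, mhi) :: rest) p = p :: (mlo, mhi) :: rest := by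
          simp [pvMergeStep, hc]
        rw [hstep, ih (p :: (mlo, mhi) :: rest) hpwl
          (fun x hx => hple x hx)]
        simp only [pvAnyContains, List.any_cons]
        cases h0 : decide (p.1 ≤ v ∧ v ≤ p.2) <;>
          cases h1 : decide (mlo ≤ v ∧ v ≤ mhi) <;>
          cases rest.any (fun q => decide (q.1 ≤ v ∧ v ≤ q.2)) <;>
          cases h3 : l.any (fun q => decide (q.1 ≤ v ∧ v ≤ q.2)) <;> simp

-- the heart of the equivalence: A's validity test equals membership in B's merged intervals
lemma pvValid_eq_merged (rules : List (String × List (List Int)))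
    (hlen : ∀ r ∈ rules, ∀ pair ∈ r.2, 2 ≤ pair.length)
    (hnd : (rules.map Prod.fst).Nodup) (v : Int) :
    pvIsValidAll v (PySem.Dict.mk rules) = pvAnyContains v (pvMerged (PySem.Dict.mk rules)) := by
  set d : PySem.Dict String (List (List Int)) := PySem.Dict.mk rules with hd
  have hknd : d.keys.Nodup := by simpa [hd, PySem.Dict.keys] using hnd
  -- A side: scan over keys = any over values
  have h1 : pvIsValidAll v d = d.values.any (fun rl => pvIsValid v rl) := by
    rw [pvIsValidAll, pvIsValidAllGo_eq_any]
    have := PySem.Dict.values_eq_map_keys d hknd []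
    rw [this]
    simp [List.any_map, Function.comp_def]
  have hval : ∀ rl ∈ d.values, ∀ pair ∈ rl, 2 ≤ pair.length := by
    intro rl hrl pair hpair
    simp only [hd, PySem.Dict.values, List.mem_map] at hrl
    obtain ⟨r, hr, hrv⟩ := hrl
    exact hlen r hr pair (hrv ▸ hpair)
  have h2 : d.values.any (fun rl => pvIsValid v rl)
      = d.values.any (fun rl => pvAnyContains v (rl.map pvToPair)) :=
    PySem.List.any_congr_mem (fun rl hrl => pvIsValid_eq_any v rl (hval rl hrl))
  -- B side: fold it together
  have h3 : d.values.any (fun rl => pvAnyContains v (rl.map pvToPair))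
      = pvAnyContains v (d.values.flatMap (fun rl => rl.map pvToPair)) := by
    simp [pvAnyContains, List.any_flatMap]
  have hperm : (PySem.List.sorted (d.values.flatMap (fun rl => rl.map pvToPair)) (fun q => q.1) false).Perm
      (d.values.flatMap (fun rl => rl.map pvToPair)) := PySem.List.sorted_perm _ _ _
  have h4 : pvAnyContains v (d.values.flatMap (fun rl => rl.map pvToPair))
      = pvAnyContains v (PySem.List.sorted (d.values.flatMap (fun rl => rl.map pvToPair)) (fun q => q.1) false) := by
    simp only [pvAnyContains]
    exact (hperm.any_eq).symm
  have hpw := PySem.List.sorted_pairwise (d.values.flatMap (fun rl => rl.map pvToPair)) (fun q => q.1)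
  have h5 := pvMerge_any v (PySem.List.sorted (d.values.flatMap (fun rl => rl.map pvToPair)) (fun q => q.1) false)
    [] hpw (fun x _ => trivial)
  rw [h1, h2, h3, h4, pvMerged, h5]
  simp [pvAnyContains]

-- ===== VERDICT (by name: the statement is the Claim_ definition above) =====
theorem check_valid_tickets_spec : Claim_equal_check_valid_tickets := by
  intro rules ticket_list cache _ hpre
  obtain ⟨hlen, hndr, _⟩ := hpre
  unfold Spec_check_valid_tickets check_valid_tickets check_valid_tickets_alt
  have hv := pvValid_eq_merged rules hlen hndr
  simp only [hv]
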